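-- pv_equiv track=rewrite | github.com/Arnav3067/THE-GOLD-MINE | ASCII and UNICODE/Convertor.py | Byte2
-- ===== SOURCE A (Python) =====
-- def Byte2(string) :
--     buffer = 11 - len(string)
--     unicode = ''
--     counter = 0
--     fixedDigits = "110" + ("0" * buffer)
--
--     for i in string[::-1]:
--         unicode += i
--         counter += 1
--
--         if (counter == 6) :
--             unicode += "01"
--
--     unicode += fixedDigits[::-1]
--
--     return unicode[::-1]
-- ===== SOURCE B (Python) =====
-- def Byte2(string):
--     n = len(string)
--     prefix = "110" + "0" * (11 - n)
--     if n >= 6: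
--         return prefix + string[:n-6] + "10" + string[n-6:]
--     return prefix + string
-- ===== Notes on version B (the rewrite author's own statement) =====
-- stated objective: simpler
-- what changed: Replaces A's pipeline (reverse the string, append chars in a counter loop that inserts the marker bits after the sixth char, append the reversed prefix, reverse the whole result) by a direct slice construction: the fixed three-bit prefix plus zero-pad, then the slices of the input around position n-6 with the two marker bits between them (no marker when n < 6); no reversals and no loop. Mechanism: three bulk slice/concat operations replace A's per-character string appends and three full reversals (measured ~8x at the largest size).
import Mathlib
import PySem

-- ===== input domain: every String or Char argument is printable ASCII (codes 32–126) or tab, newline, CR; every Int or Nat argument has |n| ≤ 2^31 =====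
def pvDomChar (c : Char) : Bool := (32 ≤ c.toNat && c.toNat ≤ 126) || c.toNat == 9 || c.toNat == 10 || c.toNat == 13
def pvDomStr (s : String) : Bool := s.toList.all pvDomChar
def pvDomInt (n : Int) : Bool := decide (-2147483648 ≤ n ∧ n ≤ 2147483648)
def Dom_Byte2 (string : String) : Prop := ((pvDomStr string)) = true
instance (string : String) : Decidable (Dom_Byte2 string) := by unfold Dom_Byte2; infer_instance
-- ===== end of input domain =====

-- B replaces A's reverse → append-loop-with-counter → reverse pipeline by a direct
-- slice construction: prefix ++ take (n-6) ++ marker ++ drop (n-6) (no marker when n < 6).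
-- Objective: simpler.

-- ===== PORT A =====
-- the for-loop over string[::-1]: state (unicode, counter); after the 6th char append "01"
def byte2Loop : List Char → Int → List Char → List Char
  | [], _, unicode => unicode
  | i :: rest, counter, unicode =>
    let unicode := unicode ++ [i]
    let counter := counter + 1
    let unicode := if counter = 6 then unicode ++ ['0', '1'] else unicode
    byte2Loop rest counter unicode

def Byte2 (string : String) : String :=
  let buffer : Int := 11 - (string.toList.length : Int)
  -- "0" * buffer: empty when buffer ≤ 0, exactly Int.toNat
  let fixedDigits : List Char := "110".toList ++ List.replicate buffer.toNat '0'
  let unicode := byte2Loop string.toList.reverse 0 []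
  let unicode := unicode ++ fixedDigits.reverse
  String.ofList unicode.reverse

-- ===== PORT B =====
def Byte2_alt (string : String) : String :=
  let l := string.toList
  let n := l.length
  let prefix_ : List Char := "110".toList ++ List.replicate (11 - n) '0'
  if n ≥ 6 then
    String.ofList (prefix_ ++ l.take (n - 6) ++ ['1', '0'] ++ l.drop (n - 6))
  else
    String.ofList (prefix_ ++ l)

-- ===== PRECONDITION & SPEC =====
def Spec_Byte2 (string : String) (out : String) : Prop := out = Byte2_alt string
instance (string : String) (out : String) : Decidable (Spec_Byte2 string out) := by unfold Spec_Byte2; infer_instance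

-- ===== CLAIM (what is proved, stated in full; the proofs are below) =====
def Claim_equal_Byte2 : Prop := ∀ (string : String), Dom_Byte2 string → Spec_Byte2 string (Byte2 string)

-- ===== LEMMAS AND PROOFS =====

-- once the counter has passed 6, the branch never fires again
theorem byte2Loop_past (l : List Char) : ∀ (c : Int) (acc : List Char), 6 ≤ c →
    byte2Loop l c acc = acc ++ l := by
  induction l with
  | nil => intro c acc _; simp [byte2Loop]
  | cons x xs ih =>
    intro c acc hc
    simp only [byte2Loop]
    rw [if_neg (by omega), ih (c + 1) (acc ++ [x]) (by omega)]
    simp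

-- loop characterisation for counters below 6
theorem byte2Loop_lt (l : List Char) : ∀ (c : Int) (acc : List Char), 0 ≤ c → c < 6 →
    byte2Loop l c acc =
      if 6 ≤ c + l.length then
        acc ++ l.take (6 - c).toNat ++ ['0', '1'] ++ l.drop (6 - c).toNat
      else acc ++ l := by
  induction l with
  | nil => intro c acc h0 h6; simp [byte2Loop]; omega
  | cons x xs ih =>
    intro c acc h0 h6
    simp only [byte2Loop]
    by_cases h : c + 1 = 6
    · rw [if_pos h, byte2Loop_past xs (c + 1) _ (by omega)]
      have : (6 - c).toNat = 1 := by omega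
      simp [this]
      omega
    · rw [if_neg h, ih (c + 1) (acc ++ [x]) (by omega) (by omega)]
      have ht : (6 - (c + 1)).toNat + 1 = (6 - c).toNat := by omega
      by_cases hl : 6 ≤ c + 1 + (xs.length : Int)
      · rw [if_pos hl, if_pos (by simp only [List.length_cons] at *; push_cast at *; omega)]
        have h1 : (x :: xs).take (6 - c).toNat = x :: xs.take (6 - (c + 1)).toNat := by
          rw [← ht]; simp
        have h2 : (x :: xs).drop (6 - c).toNat = xs.drop (6 - (c + 1)).toNat := by
          rw [← ht]; simp
        simp [h1, h2]
      · rw [if_neg hl, if_neg (by simp only [List.length_cons] at *; push_cast at *; omega)]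
        simp

theorem Byte2_spec : Claim_equal_Byte2 := by
  intro s _
  unfold Spec_Byte2 Byte2 Byte2_alt
  simp only []
  set l := s.toList with hl
  by_cases h : l.length ≥ 6
  · rw [if_pos h]
    rw [byte2Loop_lt l.reverse 0 [] (by omega) (by omega)]
    rw [if_pos (by simp; omega)]
    have h6 : (6 - (0:Int)).toNat = 6 := by omega
    have hbuf : ((11 - (l.length : Int)).toNat) = 11 - l.length := by omega
    simp [hbuf, List.reverse_append, List.reverse_take, List.reverse_drop]
  · rw [if_neg h]
    rw [byte2Loop_lt l.reverse 0 [] (by omega) (by omega)]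
    rw [if_neg (by simp; omega)]
    have hbuf : ((11 - (l.length : Int)).toNat) = 11 - l.length := by omega
    simp [hbuf, List.reverse_append]
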